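-- pv_equiv track=rewrite | github.com/MrBrantCode/unitest_baseline | mut_generate/mist_train_cf/cf_9758/solution.py | findThreeDuplicates
-- ===== SOURCE A (Python) =====
-- def findThreeDuplicates(A):
--     """
--     Return the indices of elements that appear exactly three times in the array.
--     If no element appears exactly three times or if more than one element appears
--     exactly three times, return an empty list.
--
--     Args:
--         A (list): The input array.
--
--     Returns:
--         list: The indices of elements that appear exactly three times.
--     """
--     occurrences = {}
--     for num in A:
--         if num not in occurrences:
--             occurrences[num] = [1]
--         else:
--             occurrences[num].append(1)
--
--     duplicateIndices = []
--     for key, value in occurrences.items():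
--         if len(value) == 3:
--             duplicateIndices.extend([i for i, x in enumerate(A) if x == key])
--         if len(duplicateIndices) > 3:
--             return []
--
--     if len(duplicateIndices) != 3:
--         return []
--
--     return duplicateIndices
-- ===== SOURCE B (Python) =====
-- def findThreeDuplicates(A):
--     positions = {}
--     for i, x in enumerate(A):
--         positions.setdefault(x, []).append(i)
--     triples = [v for v in positions.values() if len(v) == 3]
--     return triples[0] if len(triples) == 1 else []
-- ===== Notes on version B (the rewrite author's own statement) =====
-- stated objective: simpler
-- what changed: B builds one value-to-indices table in a single pass and returns the unique length-3 index list, removing A's per-key enumerate(A) rescans and the cross-key accumulator with its early-exit length checks.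
import Mathlib
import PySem

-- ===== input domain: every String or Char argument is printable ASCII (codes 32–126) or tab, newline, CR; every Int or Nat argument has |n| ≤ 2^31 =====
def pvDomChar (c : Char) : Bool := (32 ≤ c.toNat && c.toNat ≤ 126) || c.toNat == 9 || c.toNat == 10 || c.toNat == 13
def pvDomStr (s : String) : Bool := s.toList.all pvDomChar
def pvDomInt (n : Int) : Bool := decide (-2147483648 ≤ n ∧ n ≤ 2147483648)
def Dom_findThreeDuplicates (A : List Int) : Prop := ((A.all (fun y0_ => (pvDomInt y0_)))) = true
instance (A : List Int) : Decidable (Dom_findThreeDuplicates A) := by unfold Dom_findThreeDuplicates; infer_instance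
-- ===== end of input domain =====

-- B builds a value→indices table in one pass and returns the unique length-3 index list,
-- replacing A's per-key enumerate(A) rescans and cross-key accumulator with early exits (objective: simpler).


-- ===== PORT A =====
-- second loop of A: over occurrences.items, accumulating duplicateIndices with the early `return []`
def aLoopFTD (A : List Int) : List (Int × List Int) → List Int → List Int
  | [], dup => if dup.length ≠ 3 then [] else dup
  | (key, value) :: rest, dup =>
    let dup' := if value.length = 3
      then dup ++ ((PySem.List.enumerate A 0).filter (fun p => p.2 == key)).map (fun p => p.1)
      else dup
    if dup'.length > 3 then [] else aLoopFTD A rest dup'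

def findThreeDuplicates (A : List Int) : List Int :=
  let occurrences := A.foldl (fun d num =>
      if d.contains num = false then d.insert num [(1 : Int)]
      else d.modify num [] (fun v => v ++ [(1 : Int)])) PySem.Dict.empty
  aLoopFTD A occurrences.items []

-- ===== PORT B =====
def findThreeDuplicates_alt (A : List Int) : List Int :=
  let positions := (PySem.List.enumerate A 0).foldl
      (fun d p => d.modify p.2 [] (fun l => l ++ [p.1])) PySem.Dict.empty
  let triples := positions.values.filter (fun v => v.length == 3)
  if triples.length = 1 then triples.headD [] else []  -- triples[0]: under the guard the list is nonempty

-- ===== PRECONDITION & SPEC =====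
def Spec_findThreeDuplicates (A : List Int) (out : List Int) : Prop := out = findThreeDuplicates_alt A
instance (A : List Int) (out : List Int) : Decidable (Spec_findThreeDuplicates A out) := by unfold Spec_findThreeDuplicates; infer_instance

-- ===== CLAIM (what is proved, stated in full; the proofs are below) =====
def Claim_equal_findThreeDuplicates : Prop := ∀ (A : List Int), Dom_findThreeDuplicates A → Spec_findThreeDuplicates A (findThreeDuplicates A)

-- ===== LEMMAS AND PROOFS =====

-- index list of a value, as both programs compute it
def idxsFTD (A : List Int) (k : Int) : List Int :=
  ((PySem.List.enumerate A 0).filter (fun p => p.2 == k)).map (fun p => p.1)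

-- A's dict-building step is a plain modify
lemma stepA_eq_modify (d : PySem.Dict Int (List Int)) (num : Int) :
    (if d.contains num = false then d.insert num [(1 : Int)]
     else d.modify num [] (fun v => v ++ [(1 : Int)])) = d.modify num [] (fun v => v ++ [(1 : Int)]) := by
  by_cases h : d.contains num = false
  · simp only [h, if_true]
    unfold PySem.Dict.modify
    rw [PySem.Dict.getD_of_not_contains _ _ h]
    rfl
  · simp [h]

lemma length_idxs (A : List Int) (k : Int) :
    (idxsFTD A k).length = (A.filter (fun x => x == k)).length := by
  simp only [idxsFTD, List.length_map, ← List.countP_eq_length_filter]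
  have hm := PySem.List.map_snd_enumerate A (0 : Int)
  calc (PySem.List.enumerate A 0).countP (fun p => p.2 == k)
      = ((PySem.List.enumerate A 0).map (·.2)).countP (fun x => x == k) := by
        rw [List.countP_map]; rfl
    _ = A.countP (fun x => x == k) := by rw [hm]

lemma aLoop_no_triple (A : List Int) (l : List (Int × List Int)) (acc : List Int)
    (h : l.filter (fun p => p.2.length == 3) = []) :
    aLoopFTD A l acc = if acc.length ≠ 3 then [] else acc := by
  induction l generalizing acc with
  | nil => rfl
  | cons p rest ih =>
    obtain ⟨key, value⟩ := p
    simp only [List.filter_cons] at h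
    by_cases hv : value.length = 3
    · simp [hv] at h
    · have h3 : (value.length == 3) = false := by simp [hv]
      rw [h3] at h
      simp only [aLoopFTD, hv, if_false]
      by_cases hg : acc.length > 3
      · have hne : acc.length ≠ 3 := by omega
        simp [hg, hne]
      · simp only [hg, if_false]
        exact ih acc (by simpa using h)

lemma aLoop_full (A : List Int) (l : List (Int × List Int)) (acc : List Int)
    (hlen : ∀ p ∈ l, p.2.length = (idxsFTD A p.1).length)
    (hacc : acc.length = 3)
    (h : l.filter (fun p => p.2.length == 3) ≠ []) :
    aLoopFTD A l acc = [] := by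
  induction l generalizing acc with
  | nil => simp at h
  | cons p rest ih =>
    obtain ⟨key, value⟩ := p
    by_cases hv : value.length = 3
    · have hidx : (idxsFTD A key).length = 3 := by
        have := hlen (key, value) (List.mem_cons_self ..); simp at this; omega
      have hf : (((PySem.List.enumerate A 0).filter (fun p => p.2 == key)).map (fun p => p.1)).length = 3 := by
        simpa [idxsFTD] using hidx
      simp only [aLoopFTD, hv, if_true]
      rw [if_pos (by rw [List.length_append]; omega)]
    · have h3 : (value.length == 3) = false := by simp [hv]
      simp only [List.filter_cons, h3] at h
      simp only [aLoopFTD, hv, if_false]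
      have hg : ¬ acc.length > 3 := by omega
      simp only [hg, if_false]
      exact ih acc (fun p hp => hlen p (List.mem_cons_of_mem _ hp)) hacc (by simpa using h)

lemma aLoop_main (A : List Int) (l : List (Int × List Int))
    (hlen : ∀ p ∈ l, p.2.length = (idxsFTD A p.1).length) :
    aLoopFTD A l [] = (match l.filter (fun p => p.2.length == 3) with
      | [p] => idxsFTD A p.1
      | _ => []) := by
  induction l with
  | nil => rfl
  | cons p rest ih =>
    obtain ⟨key, value⟩ := p
    by_cases hv : value.length = 3
    · have hidx : (idxsFTD A key).length = 3 := by
        have := hlen (key, value) (List.mem_cons_self ..); simp at this; omega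
      have hf : (((PySem.List.enumerate A 0).filter (fun p => p.2 == key)).map (fun p => p.1)).length = 3 := by
        simpa [idxsFTD] using hidx
      have h3 : (value.length == 3) = true := by simp [hv]
      simp only [aLoopFTD, hv, if_true, List.nil_append, List.filter_cons]
      rw [if_neg (by omega)]
      by_cases hr : rest.filter (fun p => p.2.length == 3) = []
      · have hnt := aLoop_no_triple A rest (idxsFTD A key) hr
        simp only [idxsFTD] at hnt
        rw [hnt, if_neg (by omega), hr]
        simp [idxsFTD]
      · have hfull := aLoop_full A rest (idxsFTD A key)
          (fun p hp => hlen p (List.mem_cons_of_mem _ hp)) hidx hr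
        simp only [idxsFTD] at hfull
        rw [hfull]
        cases hc : rest.filter (fun p => p.2.length == 3) with
        | nil => exact absurd hc hr
        | cons q t => rfl
    · have h3 : (value.length == 3) = false := by simp [hv]
      simp only [aLoopFTD, hv, if_false, List.filter_cons, h3, if_false]
      simpa using ih (fun p hp => hlen p (List.mem_cons_of_mem _ hp))

-- B-side dict: getD is exactly the index list
lemma pos_getD (A : List Int) (k : Int) :
    ((PySem.List.enumerate A 0).foldl
      (fun d p => d.modify p.2 [] (fun l => l ++ [p.1])) PySem.Dict.empty).getD k []
    = idxsFTD A k := by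
  have h2 : (PySem.List.enumerate A 0).foldl
      (fun d p => d.modify p.2 [] (fun l => l ++ [p.1])) PySem.Dict.empty
      = ((PySem.List.enumerate A 0).map (fun p => (p.2, p.1))).foldl
        (fun d p => d.modify p.1 [] (fun x => x ++ [p.2])) PySem.Dict.empty := by
    rw [List.foldl_map]
  rw [h2, PySem.Dict.getD_foldl_modify_append]
  simp [List.filter_map, idxsFTD, Function.comp_def, List.map_map]

-- A-side dict: getD has the length of the index list
lemma occ_getD_len (A : List Int) (k : Int) :
    ((A.foldl (fun d num => d.modify num [] (fun v => v ++ [(1 : Int)])) PySem.Dict.empty).getD k []).length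
    = (idxsFTD A k).length := by
  have h1 : A.foldl (fun d num => d.modify num [] (fun v => v ++ [(1 : Int)])) PySem.Dict.empty
      = (A.map (fun x => (x, (1 : Int)))).foldl
        (fun d p => d.modify p.1 [] (fun x => x ++ [p.2])) PySem.Dict.empty := by
    rw [List.foldl_map]
  rw [h1, PySem.Dict.getD_foldl_modify_append, length_idxs]
  simp [List.filter_map, Function.comp_def]

-- ===== VERDICT (by name: the statement is the Claim_ definition above) =====
theorem findThreeDuplicates_spec : Claim_equal_findThreeDuplicates := by
  intro A _
  unfold Spec_findThreeDuplicates
  simp only [findThreeDuplicates, findThreeDuplicates_alt, stepA_eq_modify]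
  set occ := A.foldl (fun d num => d.modify num [] (fun v => v ++ [(1 : Int)])) PySem.Dict.empty with hocc
  set pos := (PySem.List.enumerate A 0).foldl
      (fun d p => d.modify p.2 [] (fun l => l ++ [p.1])) PySem.Dict.empty with hpos
  have hoccN : occ.keys.Nodup := by
    have := PySem.Dict.nodup_keys_foldl_modify_key A (fun x => x) ([] : List Int)
      (fun _ _ => (fun v => v ++ [(1 : Int)])) PySem.Dict.empty (by simp [PySem.Dict.keys_empty])
    simpa [hocc] using this
  have hposN : pos.keys.Nodup := by
    have := PySem.Dict.nodup_keys_foldl_modify_key (PySem.List.enumerate A 0) (fun p => p.2)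
      ([] : List Int) (fun _ p => (fun l => l ++ [p.1])) PySem.Dict.empty (by simp [PySem.Dict.keys_empty])
    simpa [hpos] using this
  have hoccK : occ.keys = PySem.Set.update ([] : List Int) A := by
    have := PySem.Dict.keys_foldl_modify A ([] : List Int)
      (fun _ _ => (fun v => v ++ [(1 : Int)])) PySem.Dict.empty
    simpa [hocc, PySem.Dict.keys_empty] using this
  have hposK : pos.keys = PySem.Set.update ([] : List Int) A := by
    have := PySem.Dict.keys_foldl_modify_key (PySem.List.enumerate A 0) (fun p => p.2)
      ([] : List Int) (fun _ p => (fun l => l ++ [p.1])) PySem.Dict.empty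
    simpa [hpos, PySem.Dict.keys_empty, PySem.List.map_snd_enumerate] using this
  have hoccG : ∀ k, (occ.getD k []).length = (idxsFTD A k).length := fun k => occ_getD_len A k
  have hposG : ∀ k, pos.getD k [] = idxsFTD A k := fun k => pos_getD A k
  rw [PySem.Dict.items_eq_map_keys occ hoccN [], PySem.Dict.values_eq_map_keys pos hposN [],
    hoccK, hposK]
  set K := PySem.Set.update ([] : List Int) A with hK
  rw [aLoop_main A _ (by
    intro p hp
    obtain ⟨k, _, rfl⟩ := List.mem_map.1 hp
    simpa using hoccG k)]
  rw [List.filter_map, List.filter_map]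
  have hc1 : K.filter ((fun p => p.2.length == 3) ∘ (fun k => (k, occ.getD k []))) =
      K.filter (fun k => (idxsFTD A k).length == 3) :=
    List.filter_congr (fun k _ => by simp [hoccG k])
  have hc2 : K.filter ((fun v => v.length == 3) ∘ (fun k => pos.getD k [])) =
      K.filter (fun k => (idxsFTD A k).length == 3) :=
    List.filter_congr (fun k _ => by simp [hposG k])
  rw [hc1, hc2]
  have hv : ∀ l : List Int, (l.filter (fun k => (idxsFTD A k).length == 3)).map (fun k => pos.getD k []) =
      (l.filter (fun k => (idxsFTD A k).length == 3)).map (idxsFTD A) :=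
    fun l => List.map_congr_left (fun k _ => hposG k)
  rw [hv]
  cases hKf : K.filter (fun k => (idxsFTD A k).length == 3) with
  | nil => simp
  | cons k t =>
    cases t with
    | nil => simp
    | cons k2 t2 => simp
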